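-- pv_equiv track=rewrite | github.com/ptyshevs/dota | feature_engineering/features.py | player_multi_kills
-- ===== SOURCE A (Python) =====
-- def player_multi_kills(player):
--
--     mk_cum = {'2': 0, '>2': 0}
--
--     mk = {int(k):v for k, v in player['multi_kills'].items()}
--     sorted_mk = sorted(mk.keys(), reverse=True)
--
--     for i, k in enumerate(sorted_mk):
--         if mk[k] == 0:
--             continue
--         if k == 2:
--             mk_cum['2'] += mk[k]
--         else:
--             mk_cum['>2'] += mk[k]
--         v = mk[k]
--         for ki in sorted_mk[i:]:
--             mk[ki] -= v
--     return mk_cum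
-- ===== SOURCE B (Python) =====
-- def player_multi_kills(player):
--     mk = {int(k): v for k, v in player['multi_kills'].items()}
--     if not mk:
--         return {'2': 0, '>2': 0}
--     c2 = 0
--     if 2 in mk:
--         above = [k for k in mk if k > 2]
--         c2 = mk[2] - (mk[min(above)] if above else 0)
--     return {'2': c2, '>2': mk[min(mk)] - c2}
-- ===== Notes on version B (the rewrite author's own statement) =====
-- stated objective: simpler
-- what changed: A's sorted pass with an inner subtract-from-all-remaining-keys loop is replaced by a loop-free closed form: the contributions telescope, so the '2' bucket is mk[2] minus the value at the smallest key above 2, and the '>2' bucket is the value at the overall smallest key minus the '2' bucket.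
import Mathlib
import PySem

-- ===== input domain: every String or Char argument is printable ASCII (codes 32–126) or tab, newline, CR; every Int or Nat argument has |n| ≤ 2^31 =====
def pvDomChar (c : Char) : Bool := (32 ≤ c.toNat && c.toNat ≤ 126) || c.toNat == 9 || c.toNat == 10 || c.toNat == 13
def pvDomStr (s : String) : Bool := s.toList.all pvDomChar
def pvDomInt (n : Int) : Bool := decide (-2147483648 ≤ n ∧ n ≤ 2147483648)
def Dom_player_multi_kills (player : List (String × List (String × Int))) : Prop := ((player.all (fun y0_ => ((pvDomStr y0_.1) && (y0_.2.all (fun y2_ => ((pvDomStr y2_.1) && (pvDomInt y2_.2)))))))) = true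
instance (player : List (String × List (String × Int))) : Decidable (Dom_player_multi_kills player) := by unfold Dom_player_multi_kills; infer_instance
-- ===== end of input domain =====

-- B replaces A's quadratic subtract-and-rescan loop by a loop-free closed form: the bucket
-- totals telescope, so '2' = mk[2] minus the value at the smallest key above 2, and '>2' is
-- the value at the smallest key minus the '2' bucket (simpler, no sorting, no sequential pass).

-- ===== PORT A =====
-- player['multi_kills'] : first-match lookup in the association list
def pmkLookup (player : List (String × List (String × Int))) : Option (List (String × Int)) :=
  (player.find? (fun q => q.1 == "multi_kills")).map (·.2)

-- mk = {int(k): v for k, v in …items()}; keys that fail int() only occur outside Pre_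
def pmkBuild (inner : List (String × Int)) : PySem.Dict Int Int :=
  inner.foldl (fun d kv =>
    match PySem.Int.ofStr? kv.1 with
    | some n => d.insert n kv.2
    | none => d) PySem.Dict.empty

-- A's outer loop over sorted_mk, mutating mk: sorted_mk[i:] = k :: tl at step i
def pmkLoopA (mk : PySem.Dict Int Int) (rest : List Int) (c2 cg : Int) : Int × Int :=
  match rest with
  | [] => (c2, cg)
  | k :: tl =>
    let v := mk.getD k 0
    if v = 0 then pmkLoopA mk tl c2 cg
    else
      let c2' := if k = 2 then c2 + v else c2
      let cg' := if k = 2 then cg else cg + v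
      pmkLoopA ((k :: tl).foldl (fun d ki => d.modify ki 0 (fun w => w - v)) mk) tl c2' cg'

def player_multi_kills (player : List (String × List (String × Int))) : List (String × Int) :=
  match pmkLookup player with
  | none => []   -- KeyError in Python: outside Pre_
  | some inner =>
    let mk := pmkBuild inner
    let sorted_mk := PySem.List.sorted mk.keys (fun x => x) true
    let r := pmkLoopA mk sorted_mk 0 0
    [("2", r.1), (">2", r.2)]

-- ===== PORT B =====
def player_multi_kills_alt (player : List (String × List (String × Int))) : List (String × Int) :=
  match pmkLookup player with
  | none => []   -- KeyError in Python: outside Pre_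
  | some inner =>
    let mk := pmkBuild inner
    if mk.keys.isEmpty then [("2", 0), (">2", 0)]
    else
      let c2 : Int :=
        if mk.contains 2 then
          let above := mk.keys.filter (fun k => decide (2 < k))
          mk.getD 2 0 -
            (match PySem.List.min? above (fun x => x) with
             | some m => mk.getD m 0
             | none => 0)
        else 0
      let mfull : Int :=
        match PySem.List.min? mk.keys (fun x => x) with
        | some m => mk.getD m 0
        | none => 0   -- unreachable: keys nonempty
      [("2", c2), (">2", mfull - c2)]

-- ===== PRECONDITION & SPEC =====
-- Pre_ excludes exactly the inputs where Python A raises: a missing 'multi_kills' key (KeyError)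
-- or an inner key that int() cannot parse (ValueError).
def Pre_player_multi_kills (player : List (String × List (String × Int))) : Prop :=
  (match (player.find? (fun q => q.1 == "multi_kills")).map (·.2) with
   | none => false
   | some inner => inner.all (fun kv => (PySem.Int.ofStr? kv.1).isSome)) = true
instance (player : List (String × List (String × Int))) : Decidable (Pre_player_multi_kills player) := by unfold Pre_player_multi_kills; infer_instance

def pvWitness_player_multi_kills : (List (String × List (String × Int))) :=
  [("multi_kills", [("2", 3), ("3", 1), ("4", 0)])]

def Spec_player_multi_kills (player : List (String × List (String × Int))) (out : List (String × Int)) : Prop := out = player_multi_kills_alt player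
instance (player : List (String × List (String × Int))) (out : List (String × Int)) : Decidable (Spec_player_multi_kills player out) := by unfold Spec_player_multi_kills; infer_instance

-- ===== CLAIM (what is proved, stated in full; the proofs are below) =====
def Claim_equal_player_multi_kills : Prop := ∀ (player : List (String × List (String × Int))), Dom_player_multi_kills player → Pre_player_multi_kills player → Spec_player_multi_kills player (player_multi_kills player)

-- ===== LEMMAS AND PROOFS =====

-- proof-only intermediate: the one-pass offset loop (the hint's accumulator form),
-- used only as a bridge between A's mutating loop and B's closed form
def pmkLoopB (mk : PySem.Dict Int Int) (rest : List Int) (off c2 cg : Int) : Int × Int :=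
  match rest with
  | [] => (c2, cg)
  | k :: tl =>
    let adjusted := mk.getD k 0 - off
    if adjusted = 0 then pmkLoopB mk tl off c2 cg
    else pmkLoopB mk tl (off + adjusted)
      (if k = 2 then c2 + adjusted else c2) (if k = 2 then cg else cg + adjusted)

-- value at the last key of l (the minimum, once l is descending), or off for []
def pmkLast (mk : PySem.Dict Int Int) (off : Int) (l : List Int) : Int :=
  match l.getLast? with
  | none => off
  | some k => mk.getD k 0

-- the '2' bucket, in closed form over a descending key list
def pmkT2 (mk : PySem.Dict Int Int) (l : List Int) (off : Int) : Int :=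
  if 2 ∈ l then mk.getD 2 0 - pmkLast mk off (l.filter (fun k => decide (2 < k))) else 0

-- the inner subtraction loop, pointwise: each occurrence of x in L subtracts v once
lemma pmk_getD_foldl_modify_sub (L : List Int) (d : PySem.Dict Int Int) (v x : Int) :
    (L.foldl (fun d ki => d.modify ki 0 (fun w => w - v)) d).getD x 0
      = d.getD x 0 - v * (L.count x) := by
  induction L generalizing d with
  | nil => simp
  | cons a tl ih =>
    simp only [List.foldl_cons, ih, PySem.Dict.getD_modify, List.count_cons]
    by_cases h : x = a
    · simp [h]
      ring
    · have h2 : ¬ a = x := fun hh => h hh.symm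
      simp [h, h2]

-- keys of the comprehension dict are unique
lemma pmk_nodup_keys_build_aux (inner : List (String × Int)) (d : PySem.Dict Int Int)
    (h : d.keys.Nodup) :
    (inner.foldl (fun d kv =>
      match PySem.Int.ofStr? kv.1 with
      | some n => d.insert n kv.2
      | none => d) d).keys.Nodup := by
  induction inner generalizing d with
  | nil => simpa using h
  | cons kv tl ih =>
    simp only [List.foldl_cons]
    cases PySem.Int.ofStr? kv.1 with
    | none => exact ih d h
    | some n => exact ih _ (PySem.Dict.nodup_keys_insert _ _ _ h)

lemma pmk_nodup_keys_build (inner : List (String × Int)) : (pmkBuild inner).keys.Nodup := by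
  unfold pmkBuild
  exact pmk_nodup_keys_build_aux inner PySem.Dict.empty (by simp)

-- core invariant: if every remaining key's current value in A's mutated dict equals the
-- original value minus B's offset, A's loop computes what the offset loop computes
lemma pmk_loop_eq (rest : List Int) (mkA mk0 : PySem.Dict Int Int) (off c2 cg : Int)
    (hnd : rest.Nodup)
    (hinv : ∀ k ∈ rest, mkA.getD k 0 = mk0.getD k 0 - off) :
    pmkLoopA mkA rest c2 cg = pmkLoopB mk0 rest off c2 cg := by
  induction rest generalizing mkA off c2 cg with
  | nil => rfl
  | cons k tl ih =>
    have hk : mkA.getD k 0 = mk0.getD k 0 - off := hinv k (by simp)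
    have hndtl : tl.Nodup := hnd.of_cons
    have hknot : k ∉ tl := by
      intro hmem; exact (List.nodup_cons.mp hnd).1 hmem
    simp only [pmkLoopA, pmkLoopB, hk]
    by_cases hz : mk0.getD k 0 - off = 0
    · simp only [hz]
      exact ih mkA off c2 cg hndtl (fun x hx => hinv x (List.mem_cons_of_mem _ hx))
    · simp only [if_neg hz]
      apply ih _ _ _ _ hndtl
      intro x hx
      rw [pmk_getD_foldl_modify_sub]
      have hcx : (k :: tl).count x = 1 := by
        have : tl.count x = 1 := List.count_eq_one_of_mem hndtl hx
        rw [List.count_cons, this]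
        have : ¬ (k = x) := fun h => hknot (h ▸ hx)
        simp [this]
      rw [hcx, hinv x (List.mem_cons_of_mem _ hx)]
      push_cast
      ring

lemma pmkLast_cons (mk : PySem.Dict Int Int) (off k : Int) (xs : List Int) :
    pmkLast mk off (k :: xs) = pmkLast mk (mk.getD k 0) xs := by
  cases xs <;> simp [pmkLast, List.getLast?]

-- telescoping: the offset loop over a strictly descending key list, in closed form
lemma pmk_loopB_closed (mk : PySem.Dict Int Int) (l : List Int) (off c2 cg : Int)
    (hp : l.Pairwise (· > ·)) :
    pmkLoopB mk l off c2 cg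
      = (c2 + pmkT2 mk l off, cg + (pmkLast mk off l - off - pmkT2 mk l off)) := by
  induction l generalizing off c2 cg with
  | nil => simp [pmkLoopB, pmkT2, pmkLast]
  | cons k tl ih =>
    have hgt : ∀ y ∈ tl, k > y := (List.pairwise_cons.mp hp).1
    have hp' : tl.Pairwise (· > ·) := (List.pairwise_cons.mp hp).2
    have hlast : pmkLast mk off (k :: tl) = pmkLast mk (mk.getD k 0) tl := pmkLast_cons ..
    by_cases hk2 : k = 2
    · -- k = 2: everything in tl is below 2
      subst hk2
      have h2tl : 2 ∉ tl := fun h => absurd (hgt 2 h) (by omega)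
      have hfc : tl.filter (fun k => decide (2 < k)) = [] := by
        rw [List.filter_eq_nil_iff]
        intro a ha
        have := hgt a ha; simp; omega
      have hT : pmkT2 mk (2 :: tl) off = mk.getD 2 0 - off := by
        simp [pmkT2, hfc, pmkLast]
      have hTtl : ∀ o, pmkT2 mk tl o = 0 := fun o => by simp [pmkT2, h2tl]
      simp only [pmkLoopB]
      by_cases hz : mk.getD 2 0 - off = 0
      · rw [if_pos hz, ih _ _ _ hp', hT, hTtl, hlast]
        have hoe : off = mk.getD 2 0 := by omega
        rw [hoe]; simp only [Prod.mk.injEq]; constructor <;> ring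
      · rw [if_neg hz, ih _ _ _ hp']
        have hsum : off + (mk.getD 2 0 - off) = mk.getD 2 0 := by ring
        rw [hsum, hT, hTtl]
        simp only [hlast, if_true, Prod.mk.injEq]
        constructor <;> ring
    · -- k ≠ 2
      have hfc : (k :: tl).filter (fun k => decide (2 < k))
          = (if 2 < k then [k] else []) ++ tl.filter (fun k => decide (2 < k)) := by
        by_cases h : 2 < k <;> simp [h]
      have hT : pmkT2 mk (k :: tl) off = pmkT2 mk tl (mk.getD k 0) := by
        by_cases h2 : 2 ∈ tl
        · have hk2' : (2:Int) < k := lt_of_le_of_ne (hgt 2 h2).le (fun h => hk2 h.symm)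
          have : 2 ∈ k :: tl := List.mem_cons_of_mem _ h2
          simp only [pmkT2, if_pos this, if_pos h2, hfc, if_pos hk2']
          rw [List.singleton_append, pmkLast_cons]
        · have : 2 ∉ k :: tl := by
            intro h; rcases List.mem_cons.mp h with h | h
            · exact hk2 h.symm
            · exact h2 h
          simp [pmkT2, this, h2]
      simp only [pmkLoopB]
      by_cases hz : mk.getD k 0 - off = 0
      · have hoff : off = mk.getD k 0 := by omega
        rw [if_pos hz, ih _ _ _ hp', hT, hlast, hoff]
      · rw [if_neg hz, ih _ _ _ hp']
        have hsum : off + (mk.getD k 0 - off) = mk.getD k 0 := by ring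
        rw [hsum, hT, hlast, if_neg hk2, if_neg hk2]
        exact Prod.ext (by ring_nf) (by ring)

-- the last element of a strictly descending list is its minimum
lemma pmk_getLast_min (l : List Int) (hp : l.Pairwise (· > ·)) :
    ∀ g, l.getLast? = some g → ∀ y ∈ l, g ≤ y := by
  induction l with
  | nil => intro g h; simp at h
  | cons k tl ih =>
    intro g hg y hy
    have hgt : ∀ y ∈ tl, k > y := (List.pairwise_cons.mp hp).1
    cases tl with
    | nil =>
      simp at hg hy
      omega
    | cons a tl' =>
      have hg' : (a :: tl').getLast? = some g := by
        simpa [List.getLast?_cons_cons] using hg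
      have hgle := ih (List.pairwise_cons.mp hp).2 g hg'
      have hgmem : g ∈ a :: tl' := List.mem_of_getLast? hg'
      rcases List.mem_cons.mp hy with h | h
      · have := hgt g hgmem; omega
      · exact hgle y h

-- pmkLast over a descending list equals the dict value at min? of any permutation of it
lemma pmk_last_eq_min (mk : PySem.Dict Int Int) (l l' : List Int)
    (hp : l.Pairwise (· > ·)) (hperm : l.Perm l') :
    pmkLast mk 0 l
      = (match PySem.List.min? l' (fun x => x) with
         | some m => mk.getD m 0
         | none => 0) := by
  cases hl : l.getLast? with
  | none =>
    have hle : l = [] := List.getLast?_eq_none_iff.mp hl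
    subst hle
    have hl'e : l' = [] := hperm.symm.eq_nil
    simp [pmkLast, hl'e, PySem.List.min?]
  | some g =>
    have hgl : g ∈ l := List.mem_of_getLast? hl
    have hgmin : ∀ y ∈ l, g ≤ y := pmk_getLast_min l hp g hl
    have hl'ne : l' ≠ [] := by
      intro h; rw [h] at hperm; rw [hperm.eq_nil] at hgl; simp at hgl
    cases hm : PySem.List.min? l' (fun x => x) with
    | none => exact absurd ((PySem.List.min?_eq_none_iff l' (fun x => x)).mp hm) hl'ne
    | some m =>
      have hmem : m ∈ l := hperm.mem_iff.mpr (PySem.List.min?_mem hm)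
      have hmmin : ∀ y ∈ l', m ≤ y := PySem.List.min?_isMin hm
      have h1 : g ≤ m := hgmin m hmem
      have h2 : m ≤ g := hmmin g (hperm.mem_iff.mp hgl)
      have : g = m := le_antisymm h1 h2
      simp [pmkLast, hl, this]

-- ===== VERDICT (by name: the statement is the Claim_ definition above) =====
theorem player_multi_kills_spec : Claim_equal_player_multi_kills := by
  intro player _ _
  unfold Spec_player_multi_kills player_multi_kills player_multi_kills_alt
  cases pmkLookup player with
  | none => rfl
  | some inner =>
    simp only
    set mk := pmkBuild inner with hmk
    set S := PySem.List.sorted mk.keys (fun x => x) true with hS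
    have hndK : mk.keys.Nodup := pmk_nodup_keys_build inner
    have hperm : S.Perm mk.keys := PySem.List.sorted_perm _ _ _
    have hndS : S.Nodup := hperm.nodup_iff.mpr hndK
    have hdesc : S.Pairwise (· ≥ ·) := by
      have := PySem.List.sorted_pairwise_rev mk.keys (fun x => x)
      simpa using this
    have hp : S.Pairwise (· > ·) := by
      have := hdesc.and hndS
      exact this.imp (fun h => lt_of_le_of_ne h.1 (fun he => h.2 he.symm))
    rw [pmk_loop_eq S mk mk 0 0 0 hndS (fun k _ => by ring), pmk_loopB_closed mk S 0 0 0 hp]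
    by_cases hemp : mk.keys.isEmpty
    · have hke : mk.keys = [] := List.isEmpty_iff.mp hemp
      have hSe : S = [] := by
        rw [hS, hke]; rfl
      simp [hemp, hSe, pmkT2, pmkLast]
    · rw [if_neg hemp]
      have h2mem : mk.contains 2 = decide (2 ∈ S) := by
        rw [PySem.Dict.contains_eq_decide_mem_keys]
        simp only [decide_eq_decide]
        exact (hperm.mem_iff).symm
      have hfilt : (S.filter (fun k => decide (2 < k))).Perm
          (mk.keys.filter (fun k => decide (2 < k))) := hperm.filter _
      have hpf : (S.filter (fun k => decide (2 < k))).Pairwise (· > ·) :=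
        hp.filter _
      have hT2 : pmkT2 mk S 0
          = (if mk.contains 2 then
               mk.getD 2 0 -
                 (match PySem.List.min? (mk.keys.filter (fun k => decide (2 < k))) (fun x => x) with
                  | some m => mk.getD m 0
                  | none => 0)
             else 0) := by
        rw [h2mem, pmkT2]
        by_cases h2 : 2 ∈ S
        · rw [if_pos h2, if_pos (by simpa using h2), pmk_last_eq_min mk _ _ hpf hfilt]
        · rw [if_neg h2, if_neg (by simpa using h2)]
      have hLast : pmkLast mk 0 S
          = (match PySem.List.min? mk.keys (fun x => x) with
             | some m => mk.getD m 0
             | none => 0) := pmk_last_eq_min mk S mk.keys hp hperm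
      simp only [hT2, hLast]
      simp only [zero_add, sub_zero]
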